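-- pv_equiv track=rewrite | github.com/yigebis/leetCode0 | leetcode/put-marbles-in-bags.py | putMarbles
-- ===== SOURCE A (Python) =====
-- from typing import List
--
-- def putMarbles(weights: List[int], k: int) -> int:
--     if k == 1 or len(weights) == k:
--         return 0
--     arr = []
--     for i in range(len(weights) - 1):
--         arr.append(weights[i] + weights[i+1])
--
--     maxs, mins = weights[0], weights[0]
--     arr.sort()
--
--     for i in range(k - 1):
--         mins += arr[i]
--         maxs += arr[len(arr) - i - 1]
--
--     maxs += weights[len(weights) - 1]
--     mins += weights[len(weights) - 1]
--     return maxs - mins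
-- ===== SOURCE B (Python) =====
-- def putMarbles(weights, k):
--     # score = (sum of k-1 largest adjacent pair-sums) - (sum of k-1 smallest);
--     # select both totals by 3-way-partition quickselect instead of sorting.
--     m = k - 1
--     if m <= 0 or len(weights) == k:
--         return 0
--     pairs = [a + b for a, b in zip(weights, weights[1:])]
--     small = sum_smallest(pairs, m)
--     large = sum(pairs) - sum_smallest(pairs, len(pairs) - m)
--     return large - small
--
-- def sum_smallest(xs, m):
--     """Sum of the m smallest elements of xs (all of xs if m >= len(xs), 0 if m <= 0)."""
--     if m <= 0:
--         return 0
--     if m >= len(xs):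
--         return sum(xs)
--     p = xs[len(xs) // 2]
--     lt = [x for x in xs if x < p]
--     if m <= len(lt):
--         return sum_smallest(lt, m)
--     eq = xs.count(p)
--     if m <= len(lt) + eq:
--         return sum(lt) + p * (m - len(lt))
--     gt = [x for x in xs if x > p]
--     return sum(lt) + p * eq + sum_smallest(gt, m - len(lt) - eq)
-- ===== Notes on version B (the rewrite author's own statement) =====
-- stated objective: alternative
-- what changed: Replaces A's sort-then-accumulate (build pair-sums, sort, loop adding the k-1 smallest and k-1 largest plus cancelling endpoint terms) with a recursive 3-way-partition quickselect that computes the sum of the m smallest pair-sums directly, used once for the min side and once via the complement for the max side.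
import Mathlib
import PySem

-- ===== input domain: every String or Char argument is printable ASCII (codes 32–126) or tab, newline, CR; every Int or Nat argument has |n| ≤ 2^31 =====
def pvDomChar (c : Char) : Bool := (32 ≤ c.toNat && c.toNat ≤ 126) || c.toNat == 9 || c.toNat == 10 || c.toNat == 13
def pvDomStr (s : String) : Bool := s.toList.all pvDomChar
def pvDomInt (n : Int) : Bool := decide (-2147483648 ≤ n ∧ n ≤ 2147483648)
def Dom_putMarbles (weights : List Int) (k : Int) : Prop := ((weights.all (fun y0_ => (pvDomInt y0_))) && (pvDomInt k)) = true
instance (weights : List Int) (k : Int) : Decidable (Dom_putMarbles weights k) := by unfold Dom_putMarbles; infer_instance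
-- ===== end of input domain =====

-- B replaces A's sort-then-accumulate with a 3-way-partition quickselect of the k-1
-- smallest / largest pair-sum totals (alternative algorithm; not measured faster).

-- ===== PORT A =====
-- weights[i] is ported as pyGetD (Python raises out of range; Pre_ excludes exactly those inputs).
def putMarbles (weights : List Int) (k : Int) : Int :=
  if k = 1 ∨ PySem.List.len weights = k then 0
  else
    let arr := (PySem.List.pyRange 0 (PySem.List.len weights - 1)).foldl
      (fun acc i => acc ++ [PySem.List.pyGetD weights i 0 + PySem.List.pyGetD weights (i + 1) 0]) []
    let maxs := PySem.List.pyGetD weights 0 0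
    let mins := maxs
    let arr := PySem.List.sorted arr (fun x => x)
    let st := (PySem.List.pyRange 0 (k - 1)).foldl
      (fun (st : Int × Int) i =>
        (st.1 + PySem.List.pyGetD arr i 0,
         st.2 + PySem.List.pyGetD arr (PySem.List.len arr - i - 1) 0)) (mins, maxs)
    let maxs := st.2 + PySem.List.pyGetD weights (PySem.List.len weights - 1) 0
    let mins := st.1 + PySem.List.pyGetD weights (PySem.List.len weights - 1) 0
    maxs - mins

-- ===== PORT B =====
-- termination helper for sumSmallest (cited by its decreasing_by)
theorem unattach_filter_length_lt {α : Type} (l : List α) (f : {x // x ∈ l} → Bool)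
    (a : α) (ha : a ∈ l) (hf : f ⟨a, ha⟩ = false) :
    (l.attach.filter f).unattach.length < l.length := by
  have h1 : (l.attach.filter f).length < l.attach.length :=
    List.length_filter_lt_length_iff_exists.mpr ⟨⟨a, ha⟩, List.mem_attach _ _, by simp [hf]⟩
  simpa using h1

-- Sum of the m smallest elements of xs, by 3-way-partition quickselect (pivot = middle element).
-- xs[len(xs)//2] is ported as List.getD (the index is in range whenever this line is reached).
def sumSmallest (xs : List Int) (m : Int) : Int :=
  if hm : m ≤ 0 then 0
  else if hlen : (xs.length : Int) ≤ m then xs.sum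
  else
    let p := xs.getD (xs.length / 2) 0
    let lt := xs.filter (fun x => decide (x < p))
    if hlt : m ≤ (lt.length : Int) then sumSmallest lt m
    else
      let c : Int := (xs.count p : Int)
      if m ≤ (lt.length : Int) + c then lt.sum + p * (m - (lt.length : Int))
      else
        let gt := xs.filter (fun x => decide (p < x))
        lt.sum + p * c + sumSmallest gt (m - (lt.length : Int) - c)
termination_by xs.length
decreasing_by
  all_goals
    have hx : 0 < xs.length := by omega
    have h2 : xs.length / 2 < xs.length := Nat.div_lt_self hx (by norm_num)
    have hp : xs.getD (xs.length / 2) 0 ∈ xs := by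
      rw [List.getD_eq_getElem xs 0 h2]; exact List.getElem_mem h2
    refine unattach_filter_length_lt xs _ _ hp ?_
    simp

def putMarbles_alt (weights : List Int) (k : Int) : Int :=
  let m := k - 1
  if m ≤ 0 ∨ PySem.List.len weights = k then 0
  else
    -- weights[1:] is ported as List.drop 1 (exact: nonnegative start index)
    let pairs := (weights.zip (weights.drop 1)).map (fun ab => ab.1 + ab.2)
    let small := sumSmallest pairs m
    let large := pairs.sum - sumSmallest pairs ((pairs.length : Int) - m)
    large - small

-- ===== PRECONDITION & SPEC =====
-- Pre_ excludes exactly the inputs where A raises IndexError: weights empty (unless k=1 or k=0)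
-- or k > len(weights) (unless k=1).
def Pre_putMarbles (weights : List Int) (k : Int) : Prop :=
  k = 1 ∨ (weights.length : Int) = k ∨ (weights ≠ [] ∧ k ≤ (weights.length : Int))
instance (weights : List Int) (k : Int) : Decidable (Pre_putMarbles weights k) := by
  unfold Pre_putMarbles; infer_instance
def pvWitness_putMarbles : List Int × Int := ([1, 2, 5, 1], 3)
def Spec_putMarbles (weights : List Int) (k : Int) (out : Int) : Prop := out = putMarbles_alt weights k
instance (weights : List Int) (k : Int) (out : Int) : Decidable (Spec_putMarbles weights k out) := by
  unfold Spec_putMarbles; infer_instance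

-- ===== CLAIM (what is proved, stated in full; the proofs are below) =====
def Claim_equal_putMarbles : Prop := ∀ (weights : List Int) (k : Int), Dom_putMarbles weights k → Pre_putMarbles weights k → Spec_putMarbles weights k (putMarbles weights k)

-- ===== LEMMAS AND PROOFS =====

theorem partition3_perm (xs : List Int) (p : Int) :
    ((PySem.List.sorted (xs.filter (fun x => decide (x < p))) (fun x => x)) ++
      (List.replicate (xs.count p) p ++
        PySem.List.sorted (xs.filter (fun x => decide (p < x))) (fun x => x))).Perm xs := by
  have h1 := PySem.List.sorted_perm (xs.filter (fun x => decide (x < p))) (fun x => x) false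
  have h2 := PySem.List.sorted_perm (xs.filter (fun x => decide (p < x))) (fun x => x) false
  refine (h1.append ((List.Perm.refl _).append h2)).trans ?_
  rw [List.perm_iff_count]
  intro a
  simp only [List.count_append, List.count_replicate]
  rcases lt_trichotomy a p with h | h | h
  · have e1 : List.count a (List.filter (fun x => decide (x < p)) xs) = List.count a xs :=
      List.count_filter (by simp [h])
    have e2 : List.count a (List.filter (fun x => decide (p < x)) xs) = 0 :=
      List.count_eq_zero.mpr (fun hmem => by
        have := (List.mem_filter.mp hmem).2
        simp at this; omega)
    rw [e1, e2, if_neg (by simp; omega)]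
    omega
  · subst h
    have e1 : List.count a (List.filter (fun x => decide (x < a)) xs) = 0 :=
      List.count_eq_zero.mpr (fun hmem => by
        have := (List.mem_filter.mp hmem).2
        simp at this)
    have e2 : List.count a (List.filter (fun x => decide (a < x)) xs) = 0 :=
      List.count_eq_zero.mpr (fun hmem => by
        have := (List.mem_filter.mp hmem).2
        simp at this)
    rw [e1, e2, if_pos (by simp)]
    omega
  · have e1 : List.count a (List.filter (fun x => decide (x < p)) xs) = 0 :=
      List.count_eq_zero.mpr (fun hmem => by
        have := (List.mem_filter.mp hmem).2
        simp at this; omega)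
    have e2 : List.count a (List.filter (fun x => decide (p < x)) xs) = List.count a xs :=
      List.count_filter (by simp [h])
    rw [e1, e2, if_neg (by simp; omega)]
    omega

theorem sorted_decomp (xs : List Int) (p : Int) :
    PySem.List.sorted xs (fun x => x) =
      (PySem.List.sorted (xs.filter (fun x => decide (x < p))) (fun x => x)) ++
        (List.replicate (xs.count p) p ++
          PySem.List.sorted (xs.filter (fun x => decide (p < x))) (fun x => x)) := by
  apply PySem.List.sorted_id_eq_of_perm_of_pairwise
  · exact partition3_perm xs p
  · rw [List.pairwise_append]
    refine ⟨PySem.List.sorted_pairwise _ _, ?_, ?_⟩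
    · rw [List.pairwise_append]
      refine ⟨List.pairwise_replicate.mpr (Or.inr le_rfl), PySem.List.sorted_pairwise _ _, ?_⟩
      intro a ha b hb
      have hap := List.eq_of_mem_replicate ha
      have hbp := (List.mem_filter.mp ((PySem.List.mem_sorted _ _ _ b).mp hb)).2
      simp at hbp; omega
    · intro a ha b hb
      have hap := (List.mem_filter.mp ((PySem.List.mem_sorted _ _ _ a).mp ha)).2
      simp at hap
      rcases List.mem_append.mp hb with hb | hb
      · have := List.eq_of_mem_replicate hb; omega
      · have hbp := (List.mem_filter.mp ((PySem.List.mem_sorted _ _ _ b).mp hb)).2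
        simp at hbp; omega

theorem sumSmallest_rec : ∀ (n : Nat) (xs : List Int) (m : Int), xs.length = n →
    sumSmallest xs m = ((PySem.List.sorted xs (fun x => x)).take m.toNat).sum := by
  intro n
  induction n using Nat.strong_induction_on with
  | _ n IH =>
    intro xs m hxs
    rw [sumSmallest]
    by_cases hm : m ≤ 0
    · rw [dif_pos hm]
      simp [Int.toNat_of_nonpos hm]
    rw [dif_neg hm]
    by_cases hlen : (xs.length : Int) ≤ m
    · rw [dif_pos hlen]
      have hle : (PySem.List.sorted xs (fun x => x)).length ≤ m.toNat := by
        rw [PySem.List.length_sorted]; omega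
      rw [List.take_of_length_le hle, (PySem.List.sorted_perm xs (fun x => x) false).sum_eq]
    rw [dif_neg hlen]
    set p := xs.getD (xs.length / 2) 0 with hpdef
    set lt := List.filter (fun x => decide (x < p)) xs with hltdef
    have h2 : xs.length / 2 < xs.length := Nat.div_lt_self (by omega) (by norm_num)
    have hpm : p ∈ xs := by
      rw [hpdef, List.getD_eq_getElem xs 0 h2]; exact List.getElem_mem h2
    have hltlt : lt.length < xs.length := by
      rw [hltdef]
      exact List.length_filter_lt_length_iff_exists.mpr ⟨p, hpm, by simp⟩
    have hA : (PySem.List.sorted lt (fun x => x)).length = lt.length :=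
      PySem.List.length_sorted _ _ _
    by_cases hlt : m ≤ (lt.length : Int)
    · rw [dif_pos hlt, IH lt.length (by omega) lt m rfl, sorted_decomp xs p, List.take_append]
      have h1 : m.toNat ≤ (PySem.List.sorted lt (fun x => x)).length := by rw [hA]; omega
      rw [Nat.sub_eq_zero_of_le h1]
      simp
      rw [hltdef]
    rw [dif_neg hlt]
    by_cases hc : m ≤ (lt.length : Int) + (xs.count p : Int)
    · rw [if_pos hc, sorted_decomp xs p, List.take_append, List.take_append]
      have h1 : (PySem.List.sorted lt (fun x => x)).length ≤ m.toNat := by rw [hA]; omega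
      rw [List.take_of_length_le h1, List.take_replicate, hA]
      have h3 : m.toNat - lt.length - (List.replicate (xs.count p) p).length = 0 := by
        rw [List.length_replicate]; omega
      rw [show min (m.toNat - lt.length) (xs.count p) = m.toNat - lt.length by omega, h3]
      simp only [List.take_zero, List.append_nil, List.sum_append, List.sum_replicate,
        nsmul_eq_mul]
      rw [(PySem.List.sorted_perm lt (fun x => x) false).sum_eq]
      rw [show ((m.toNat - lt.length : Nat) : Int) = m - lt.length by omega]
      ring
    · have hgtlt : (List.filter (fun x => decide (p < x)) xs).length < xs.length :=
        List.length_filter_lt_length_iff_exists.mpr ⟨p, hpm, by simp⟩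
      rw [if_neg hc]
      simp only [← hltdef]
      rw [IH (List.filter (fun x => decide (p < x)) xs).length (by omega)
          (List.filter (fun x => decide (p < x)) xs)
          (m - (lt.length : Int) - (xs.count p : Int)) rfl,
        sorted_decomp xs p, List.take_append, List.take_append]
      have h1 : (PySem.List.sorted lt (fun x => x)).length ≤ m.toNat := by rw [hA]; omega
      rw [List.take_of_length_le h1]
      simp only [← hltdef]
      rw [hA, List.length_replicate]
      rw [List.take_of_length_le
        (show (List.replicate (List.count p xs) p).length ≤ m.toNat - lt.length by
          rw [List.length_replicate]; omega)]
      simp only [List.sum_append, List.sum_replicate, nsmul_eq_mul]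
      rw [(PySem.List.sorted_perm lt (fun x => x) false).sum_eq]
      rw [show (m - (lt.length : Int) - (xs.count p : Int)).toNat
            = m.toNat - lt.length - xs.count p by omega]
      ring

theorem sumSmallest_take (xs : List Int) (m : Int) :
    sumSmallest xs m = ((PySem.List.sorted xs (fun x => x)).take m.toNat).sum :=
  sumSmallest_rec xs.length xs m rfl

theorem pairs_eq (w : List Int) :
    (List.range (w.length - 1)).map (fun i => w.getD i 0 + w.getD (i + 1) 0) =
      (w.zip (w.drop 1)).map (fun ab => ab.1 + ab.2) := by
  apply List.ext_getElem
  · simp only [List.length_map, List.length_range, List.length_zip, List.length_drop]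
    omega
  · intro i h1 h2
    have hi : i < w.length - 1 := by
      simpa using h1
    simp only [List.getElem_map, List.getElem_range, List.getElem_zip, List.getElem_drop]
    rw [List.getD_eq_getElem w 0 (by omega), List.getD_eq_getElem w 0 (by omega)]
    simp [Nat.add_comm]

theorem sum_map_getD_range (s : List Int) (m : Nat) (h : m ≤ s.length) :
    ((List.range m).map (fun i => s.getD i 0)).sum = (s.take m).sum := by
  induction m with
  | zero => simp
  | succ m ih =>
      rw [List.range_succ, List.map_append, List.sum_append, ih (by omega)]
      simp only [List.map_cons, List.map_nil, List.sum_cons, List.sum_nil, add_zero]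
      rw [List.getD_eq_getElem s 0 (show m < s.length by omega),
        List.sum_take_succ s m (by omega)]

theorem sum_map_getD_rev_range (s : List Int) (m : Nat) (h : m ≤ s.length) :
    ((List.range m).map (fun i => s.getD (s.length - 1 - i) 0)).sum = (s.drop (s.length - m)).sum := by
  induction m with
  | zero => simp
  | succ m ih =>
      rw [List.range_succ, List.map_append, List.sum_append, ih (by omega)]
      have hidx : s.length - (m + 1) < s.length := by omega
      rw [List.drop_eq_getElem_cons hidx]
      rw [show s.length - (m + 1) + 1 = s.length - m by omega, List.sum_cons]
      simp only [List.map_cons, List.map_nil, List.sum_cons, List.sum_nil, add_zero]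
      rw [show s.length - 1 - m = s.length - (m + 1) by omega,
        List.getD_eq_getElem s 0 hidx]
      ring

theorem foldl_minmax {α : Type} (l : List α) (f g : α → Int) (a b : Int) :
    l.foldl (fun (st : Int × Int) i => (st.1 + f i, st.2 + g i)) (a, b)
      = (a + (l.map f).sum, b + (l.map g).sum) := by
  induction l generalizing a b with
  | nil => simp
  | cons x t ih =>
      rw [List.foldl_cons, ih]
      simp only [List.map_cons, List.sum_cons, Prod.mk.injEq]
      constructor <;> ring

-- ===== VERDICT (by name: the statement is the Claim_ definition above) =====
theorem putMarbles_spec : Claim_equal_putMarbles := by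
  intro w k _hdom hpre
  unfold Spec_putMarbles
  have hlenw : PySem.List.len w = (w.length : Int) := by simp [PySem.List.len]
  by_cases h0 : k = 1 ∨ PySem.List.len w = k
  · have hB : k - 1 ≤ 0 ∨ PySem.List.len w = k := by
      rcases h0 with h | h
      · exact Or.inl (by omega)
      · exact Or.inr h
    simp only [putMarbles, putMarbles_alt, if_pos h0, if_pos hB]
  · have hk1 : k ≠ 1 := fun h => h0 (Or.inl h)
    have hknz : (w.length : Int) ≠ k := fun h => h0 (Or.inr (by rw [hlenw, h]))
    have hwk : w ≠ [] ∧ k ≤ (w.length : Int) := by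
      rcases hpre with h | h | h
      · exact absurd h hk1
      · exact absurd h hknz
      · exact h
    have hn1 : 0 < w.length := List.length_pos_of_ne_nil hwk.1
    by_cases hk : k ≤ 0
    · have hr : PySem.List.pyRange 0 (k - 1) = [] := by
        refine List.eq_nil_iff_forall_not_mem.mpr (fun x hx => ?_)
        have := PySem.List.mem_pyRange_one.mp hx
        omega
      have hB : k - 1 ≤ 0 ∨ PySem.List.len w = k := Or.inl (by omega)
      simp only [putMarbles, putMarbles_alt, if_neg h0, if_pos hB, hr, List.foldl_nil]
      ring
    · have hk2 : 2 ≤ k := by omega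
      have hkn : k < (w.length : Int) := lt_of_le_of_ne hwk.2 (fun h => hknz h.symm)
      have hB : ¬(k - 1 ≤ 0 ∨ PySem.List.len w = k) := by
        rintro (h | h)
        · omega
        · exact h0 (Or.inr h)
      have hplen : ((w.zip (w.drop 1)).map (fun ab => ab.1 + ab.2)).length = w.length - 1 := by
        simp only [List.length_map, List.length_zip, List.length_drop]
        omega
      set pairs := (w.zip (w.drop 1)).map (fun ab => ab.1 + ab.2) with hpairs
      set s := PySem.List.sorted pairs (fun x => x) with hs
      have hslen : s.length = w.length - 1 := by
        rw [hs, PySem.List.length_sorted]; exact hplen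
      set m' := (k - 1).toNat with hm'
      have hm'le : m' ≤ w.length - 1 := by omega
      simp only [putMarbles, if_neg h0]
      have harr : (PySem.List.pyRange 0 (PySem.List.len w - 1)).foldl
          (fun acc i => acc ++ [PySem.List.pyGetD w i 0 + PySem.List.pyGetD w (i + 1) 0])
          ([] : List Int) = pairs := by
        rw [PySem.List.foldl_append_singleton_eq_map]
        have e1 : PySem.List.len w - 1 = ((w.length - 1 : Nat) : Int) := by
          rw [hlenw]; omega
        rw [e1, PySem.List.pyRange_zero_natCast, List.map_map, hpairs, ← pairs_eq w]
        refine List.map_congr_left (fun j hj => ?_)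
        simp only [Function.comp_apply]
        rw [PySem.List.pyGetD_natCast,
          show ((j : Int) + 1) = ((j + 1 : Nat) : Int) by push_cast; ring,
          PySem.List.pyGetD_natCast]
      rw [harr, ← hs]
      rw [show k - 1 = (m' : Int) by omega, PySem.List.pyRange_zero_natCast, List.foldl_map,
        foldl_minmax]
      have hlens : PySem.List.len s = (s.length : Int) := by simp [PySem.List.len]
      have emin : (List.map (fun j : Nat => PySem.List.pyGetD s ((j : Nat) : Int) 0)
          (List.range m')).sum = (s.take m').sum := by
        have hc : ∀ j ∈ List.range m',
            PySem.List.pyGetD s ((j : Nat) : Int) 0 = s.getD j 0 :=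
          fun j _ => PySem.List.pyGetD_natCast s j 0
        rw [List.map_congr_left hc]
        exact sum_map_getD_range s m' (by omega)
      have emax : (List.map (fun j : Nat =>
            PySem.List.pyGetD s (PySem.List.len s - (j : Nat) - 1) 0) (List.range m')).sum
          = (s.drop (s.length - m')).sum := by
        have hc : ∀ j ∈ List.range m',
            PySem.List.pyGetD s (PySem.List.len s - (j : Nat) - 1) 0
              = s.getD (s.length - 1 - j) 0 := by
          intro j hj
          have hj' : j < m' := List.mem_range.mp hj
          rw [hlens, PySem.List.pyGetD_of_nonneg s 0 (by omega)]
          rw [show ((s.length : Int) - (j : Int) - 1).toNat = s.length - 1 - j by omega]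
        rw [List.map_congr_left hc]
        exact sum_map_getD_rev_range s m' (by omega)
      rw [emin, emax]
      simp only [putMarbles_alt, if_neg hB]
      rw [sumSmallest_take pairs (k - 1), sumSmallest_take pairs ((pairs.length : Int) - (k - 1)),
        ← hs, ← hm']
      rw [show ((pairs.length : Int) - (k - 1)).toNat = s.length - m' by omega]
      have hperm : s.sum = pairs.sum := by
        rw [hs]; exact (PySem.List.sorted_perm pairs (fun x => x) false).sum_eq
      have hsplit := List.sum_take_add_sum_drop s (s.length - m')
      linarith [hsplit, hperm]
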